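-- pv_equiv track=rewrite | github.com/APodolskiy/programming_problems | dynamic_programming/minim_modulo_sum_subarray.py | solution
-- ===== SOURCE A (Python) =====
-- from typing import List
--
-- def solution(arr: List[int]) -> int:
--     assert arr
--     cum_sum = [0]
--
--     for i in range(len(arr)):
--         cum_sum.append(cum_sum[-1] + arr[i])
--     cum_sum.sort()
--
--     min_diff = None
--     for i in range(1, len(cum_sum)):
--         drop = cum_sum[i] - cum_sum[i - 1]
--         if min_diff is None or drop < min_diff:
--             min_diff = drop
--     return min_diff
-- ===== SOURCE B (Python) =====
-- from typing import List
--
-- def solution(arr: List[int]) -> int: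
--     assert arr
--     prefix = [0]
--     for x in arr:
--         prefix.append(prefix[-1] + x)
--     best = None
--     for i, p in enumerate(prefix):
--         for q in prefix[i + 1:]:
--             d = abs(q - p)
--             if best is None or d < best:
--                 best = d
--     return best
-- ===== Notes on version B (the rewrite author's own statement) =====
-- stated objective: alternative
-- what changed: B replaces A's sort-then-adjacent-scan over the prefix-sum array by a direct nested loop over all pairs of prefix sums, keeping the running minimum of abs(q - p).
import Mathlib
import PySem

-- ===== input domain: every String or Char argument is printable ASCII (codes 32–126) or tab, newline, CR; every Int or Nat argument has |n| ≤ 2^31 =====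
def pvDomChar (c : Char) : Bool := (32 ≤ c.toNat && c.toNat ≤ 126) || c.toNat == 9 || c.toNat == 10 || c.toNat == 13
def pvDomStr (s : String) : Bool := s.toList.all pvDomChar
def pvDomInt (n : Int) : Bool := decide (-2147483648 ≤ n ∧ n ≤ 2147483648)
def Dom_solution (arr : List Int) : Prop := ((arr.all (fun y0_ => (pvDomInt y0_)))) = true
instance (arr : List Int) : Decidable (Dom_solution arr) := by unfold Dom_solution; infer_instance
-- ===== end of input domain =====

-- B replaces A's sort-then-adjacent-scan over prefix sums by a direct nested pass over all
-- pairs of prefix sums taking the minimum absolute difference (objective: alternative).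

-- shared between both ports: Python's "if best is None or d < best: best = d"
def updMin (best : Option Int) (d : Int) : Option Int :=
  match best with
  | none => some d
  | some m => if d < m then some d else some m

-- ===== PORT A =====
-- "for i in range(1, len(cum_sum)): drop = cum_sum[i] - cum_sum[i-1]; …" — the index loop
-- reading s[i-1], s[i] is transcribed as a walk carrying the previous element.
def solutionLoopA : Int → List Int → Option Int → Option Int
  | _, [], md => md
  | prev, x :: xs, md => solutionLoopA x xs (updMin md (x - prev))

def solution (arr : List Int) : Int :=
  -- cum_sum = [0]; for i in range(len(arr)): cum_sum.append(cum_sum[-1] + arr[i])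
  -- (cum_sum is never empty, so cum_sum[-1] is its last element)
  let cum_sum := arr.foldl (fun cs x => cs ++ [cs.getLastD 0 + x]) [0]
  let s := PySem.List.sorted cum_sum (fun x => x) false   -- cum_sum.sort()
  match s with
  | [] => 0                                    -- unreachable: cum_sum is never empty
  | h :: t => (solutionLoopA h t none).getD 0  -- min_diff is None only for empty arr (excluded by Pre_)

-- ===== PORT B =====
-- "for q in prefix[i+1:]" — inner pass over the suffix after p
def solutionInnerB (p : Int) : List Int → Option Int → Option Int
  | [], best => best
  | q :: qs, best => solutionInnerB p qs (updMin best |q - p|)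

-- "for i, p in enumerate(prefix)" — outer pass, each p paired with its suffix
def solutionOuterB : List Int → Option Int → Option Int
  | [], best => best
  | p :: ps, best => solutionOuterB ps (solutionInnerB p ps best)

def solution_alt (arr : List Int) : Int :=
  let pfx := arr.foldl (fun cs x => cs ++ [cs.getLastD 0 + x]) [0]
  (solutionOuterB pfx none).getD 0  -- best is None only for empty arr (excluded by Pre_)

-- ===== PRECONDITION & SPEC =====
-- Pre_ excludes exactly the empty list, on which Python A raises AssertionError ('assert arr').
def Pre_solution (arr : List Int) : Prop := arr ≠ []
instance (arr : List Int) : Decidable (Pre_solution arr) := by unfold Pre_solution; infer_instance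
def pvWitness_solution : List Int := ([1, -2, 3])

def Spec_solution (arr : List Int) (out : Int) : Prop := out = solution_alt arr
instance (arr : List Int) (out : Int) : Decidable (Spec_solution arr out) := by unfold Spec_solution; infer_instance

-- ===== CLAIM (what is proved, stated in full; the proofs are below) =====
def Claim_equal_solution : Prop := ∀ (arr : List Int), Dom_solution arr → Pre_solution arr → Spec_solution arr (solution arr)

-- ===== LEMMAS AND PROOFS =====

-- all |q - p| over pairs p before q, as B's nested loop enumerates them
def pairDiffs : List Int → List Int
  | [] => []
  | x :: xs => xs.map (fun y => |y - x|) ++ pairDiffs xs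

-- consecutive differences as A's loop enumerates them
def adjDiffs : Int → List Int → List Int
  | _, [] => []
  | prev, x :: xs => (x - prev) :: adjDiffs x xs

def mino (ds : List Int) : Option Int := ds.foldl updMin none

lemma foldl_updMin_some (ds : List Int) : ∀ m : Int, ds.foldl updMin (some m) = some (ds.foldl min m) := by
  induction ds with
  | nil => intro m; rfl
  | cons x xs ih =>
    intro m
    have h : updMin (some m) x = some (min m x) := by
      rcases lt_or_ge x m with h | h
      · simp [updMin, h, min_eq_right h.le]
      · simp [updMin, not_lt.mpr h, min_eq_left h]
    simp [List.foldl, h, ih]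

lemma loopA_eq (xs : List Int) : ∀ (prev : Int) (md : Option Int),
    solutionLoopA prev xs md = (adjDiffs prev xs).foldl updMin md := by
  induction xs with
  | nil => intro prev md; rfl
  | cons x xs ih => intro prev md; simp [solutionLoopA, adjDiffs, ih]

lemma innerB_eq (p : Int) (qs : List Int) : ∀ best,
    solutionInnerB p qs best = (qs.map (fun y => |y - p|)).foldl updMin best := by
  induction qs with
  | nil => intro best; rfl
  | cons q qs ih => intro best; simp [solutionInnerB, ih]

lemma outerB_eq (ps : List Int) : ∀ best,
    solutionOuterB ps best = (pairDiffs ps).foldl updMin best := by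
  induction ps with
  | nil => intro best; rfl
  | cons p ps ih =>
    intro best
    simp [solutionOuterB, pairDiffs, List.foldl_append, ih, innerB_eq]

lemma foldl_min_le_init (ds : List Int) : ∀ m : Int, ds.foldl min m ≤ m := by
  induction ds with
  | nil => intro m; exact le_rfl
  | cons x xs ih => intro m; exact (ih (min m x)).trans (min_le_left m x)

lemma foldl_min_le_mem (ds : List Int) : ∀ (m x : Int), x ∈ ds → ds.foldl min m ≤ x := by
  induction ds with
  | nil => intro m x hx; cases hx
  | cons a as ih =>
    intro m x hx
    rcases List.mem_cons.mp hx with rfl | hx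
    · exact (foldl_min_le_init as (min m x)).trans (min_le_right m x)
    · exact ih (min m a) x hx

lemma foldl_min_mem (ds : List Int) : ∀ m : Int, ds.foldl min m = m ∨ ds.foldl min m ∈ ds := by
  induction ds with
  | nil => intro m; exact Or.inl rfl
  | cons a as ih =>
    intro m
    rcases ih (min m a) with h | h
    · rcases min_choice m a with hm | hm
      · exact Or.inl (by rw [List.foldl, h, hm])
      · exact Or.inr (by rw [List.foldl, h, hm]; exact List.mem_cons_self)
    · exact Or.inr (List.mem_cons_of_mem a h)

lemma mino_spec (x : Int) (xs : List Int) :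
    ∃ v, mino (x :: xs) = some v ∧ v ∈ x :: xs ∧ ∀ z ∈ x :: xs, v ≤ z := by
  refine ⟨xs.foldl min x, ?_, ?_, ?_⟩
  · simp [mino, List.foldl, updMin, foldl_updMin_some]
  · rcases foldl_min_mem xs x with h | h
    · rw [h]; exact List.mem_cons_self
    · exact List.mem_cons_of_mem x h
  · intro z hz
    rcases List.mem_cons.mp hz with rfl | hz
    · exact foldl_min_le_init xs z
    · exact foldl_min_le_mem xs x z hz

lemma mino_congr (d1 d2 : List Int)
    (h1 : ∀ x ∈ d1, ∃ y ∈ d2, y ≤ x) (h2 : ∀ x ∈ d2, ∃ y ∈ d1, y ≤ x) :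
    mino d1 = mino d2 := by
  cases d1 with
  | nil =>
    cases d2 with
    | nil => rfl
    | cons b bs =>
      obtain ⟨y, hy, -⟩ := h2 b List.mem_cons_self
      cases hy
  | cons a as =>
    cases d2 with
    | nil =>
      obtain ⟨y, hy, -⟩ := h1 a List.mem_cons_self
      cases hy
    | cons b bs =>
      obtain ⟨v1, he1, hm1, hl1⟩ := mino_spec a as
      obtain ⟨v2, he2, hm2, hl2⟩ := mino_spec b bs
      rw [he1, he2]
      obtain ⟨y1, hy1, hy1le⟩ := h2 v2 hm2
      obtain ⟨y2, hy2, hy2le⟩ := h1 v1 hm1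
      exact congrArg some (le_antisymm ((hl1 y1 hy1).trans hy1le) ((hl2 y2 hy2).trans hy2le))

lemma mino_perm {d1 d2 : List Int} (h : d1.Perm d2) : mino d1 = mino d2 :=
  mino_congr d1 d2 (fun x hx => ⟨x, h.mem_iff.mp hx, le_rfl⟩)
    (fun x hx => ⟨x, h.mem_iff.mpr hx, le_rfl⟩)

lemma pairDiffs_perm {l l' : List Int} (h : l.Perm l') : (pairDiffs l).Perm (pairDiffs l') := by
  induction h with
  | nil => exact List.Perm.refl _
  | cons x h ih => exact (h.map _).append ih
  | swap x y l =>
    simp only [pairDiffs, List.map_cons, List.cons_append]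
    rw [abs_sub_comm x y]
    refine List.Perm.cons _ ?_
    rw [← List.append_assoc, ← List.append_assoc]
    exact List.perm_append_comm.append_right _
  | trans _ _ ih1 ih2 => exact ih1.trans ih2

lemma adj_mem_pair (xs : List Int) : ∀ prev : Int, (prev :: xs).Pairwise (· ≤ ·) →
    ∀ d ∈ adjDiffs prev xs, d ∈ pairDiffs (prev :: xs) := by
  induction xs with
  | nil => intro prev _ d hd; cases hd
  | cons x xs ih =>
    intro prev hp d hd
    have hpx : prev ≤ x := (List.pairwise_cons.mp hp).1 x List.mem_cons_self
    rcases List.mem_cons.mp hd with rfl | hd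
    · have : |x - prev| = x - prev := abs_of_nonneg (by omega)
      exact List.mem_append_left _ (by
        rw [← this]; exact List.mem_map_of_mem List.mem_cons_self)
    · exact List.mem_append_right _ (ih x (List.pairwise_cons.mp hp).2 d hd)

lemma pair_dominated (xs : List Int) : ∀ prev : Int, (prev :: xs).Pairwise (· ≤ ·) →
    ∀ e ∈ pairDiffs (prev :: xs), ∃ d ∈ adjDiffs prev xs, d ≤ e := by
  induction xs with
  | nil => intro prev _ e he; simp [pairDiffs] at he
  | cons x xs ih =>
    intro prev hp e he
    have hhead := (List.pairwise_cons.mp hp).1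
    have hpx : prev ≤ x := hhead x List.mem_cons_self
    have htail : (x :: xs).Pairwise (· ≤ ·) := (List.pairwise_cons.mp hp).2
    rcases List.mem_append.mp he with hm | hm
    · obtain ⟨y, hy, rfl⟩ := List.mem_map.mp hm
      refine ⟨x - prev, List.mem_cons_self, ?_⟩
      have hpy : prev ≤ y := hhead y hy
      have hxy : x ≤ y := by
        rcases List.mem_cons.mp hy with rfl | hy
        · exact le_rfl
        · exact (List.pairwise_cons.mp htail).1 y hy
      rw [abs_of_nonneg (by omega : (0:Int) ≤ y - prev)]
      omega
    · obtain ⟨d, hd, hde⟩ := ih x htail e hm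
      exact ⟨d, List.mem_cons_of_mem _ hd, hde⟩

lemma foldl_snoc_ne_nil (l : List Int) : ∀ acc : List Int, acc ≠ [] →
    l.foldl (fun cs x => cs ++ [cs.getLastD 0 + x]) acc ≠ [] := by
  induction l with
  | nil => intro acc h; exact h
  | cons x xs ih =>
    intro acc h
    exact ih _ (by simp)

lemma solution_eq_alt (arr : List Int) : solution arr = solution_alt arr := by
  unfold solution solution_alt
  set P := arr.foldl (fun cs x => cs ++ [cs.getLastD 0 + x]) [0] with hP
  have hPne : P ≠ [] := foldl_snoc_ne_nil arr [0] (by simp)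
  cases hs : PySem.List.sorted P (fun x => x) false with
  | nil => exact absurd ((PySem.List.sorted_eq_nil_iff P (fun x => x) false).mp hs) hPne
  | cons h t =>
    have hperm : (h :: t).Perm P := by
      rw [← hs]; exact PySem.List.sorted_perm P (fun x => x) false
    have hpw : (h :: t).Pairwise (· ≤ ·) := by
      have := PySem.List.sorted_pairwise P (fun x => x)
      rw [hs] at this
      simpa using this
    have e1 : solutionLoopA h t none = mino (adjDiffs h t) := loopA_eq t h none
    have e2 : solutionOuterB P none = mino (pairDiffs P) := outerB_eq P none
    have e3 : mino (pairDiffs P) = mino (pairDiffs (h :: t)) :=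
      mino_perm (pairDiffs_perm hperm.symm)
    have e4 : mino (pairDiffs (h :: t)) = mino (adjDiffs h t) :=
      mino_congr _ _ (pair_dominated t h hpw)
        (fun d hd => ⟨d, adj_mem_pair t h hpw d hd, le_rfl⟩)
    dsimp only
    rw [hs]
    show (solutionLoopA h t none).getD 0 = (solutionOuterB P none).getD 0
    rw [e1, e2, e3, e4]

-- ===== VERDICT (by name: the statement is the Claim_ definition above) =====
theorem solution_spec : Claim_equal_solution := by
  intro arr _ _
  exact solution_eq_alt arr
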